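-- pv_equiv track=rewrite | github.com/Domtexe/ShrimpDev-Public | tools/R2809.py | fix_empty_try_blocks
-- ===== SOURCE A (Python) =====
-- RID = "R2809"
--
-- def fix_empty_try_blocks(lines: list[str]) -> tuple[list[str], int]:
--     """
--     If a 'try:' line is followed (ignoring blank/comment lines) immediately by an 'except' or 'finally'
--     at SAME indentation, insert an indented 'pass' to satisfy Python syntax.
--     """
--     def indent_of(s: str) -> str:
--         return s[:len(s) - len(s.lstrip(" \t"))]
--
--     out = []
--     i = 0
--     fixes = 0
--     n = len(lines)
--
--     while i < n:
--         ln = lines[i]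
--         out.append(ln)
--
--         if ln.strip() == "try:":
--             base_ind = indent_of(ln)
--
--             j = i + 1
--             # walk over blank lines and pure comments at deeper indent or same indent
--             while j < n:
--                 nxt = lines[j]
--                 st = nxt.strip()
--                 if st == "":
--                     j += 1
--                     continue
--                 # allow comments (at any indent) to be skipped
--                 if st.startswith("#"):
--                     j += 1
--                     continue
--                 break
--
--             if j < n:
--                 nxt = lines[j]
--                 nxt_ind = indent_of(nxt)
--                 st = nxt.strip()
--                 if nxt_ind == base_ind and (st.startswith("except") or st.startswith("finally")):
--                     # empty try block -> insert pass at one indent deeper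
--                     out.append(base_ind + "    " + f"pass  # {RID}: inserted to fix empty try\n")
--                     fixes += 1
--
--         i += 1
--
--     return out, fixes
-- ===== SOURCE B (Python) =====
-- RID = "R2809"
--
-- def fix_empty_try_blocks(lines: list[str]) -> tuple[list[str], int]:
--     """Single backward pass: remember the next significant line below, build the output back-to-front."""
--     def indent_of(s: str) -> str:
--         return s[:len(s) - len(s.lstrip(" \t"))]
--
--     rev = []
--     fixes = 0
--     nxt = None  # next significant (non-blank, non-comment) line below the current one
--     for ln in reversed(lines):
--         st = ln.strip()
--         if st == "try:" and nxt is not None: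
--             ns = nxt.strip()
--             if indent_of(nxt) == indent_of(ln) and (ns.startswith("except") or ns.startswith("finally")):
--                 rev.append(indent_of(ln) + "    " + f"pass  # {RID}: inserted to fix empty try\n")
--                 fixes += 1
--         rev.append(ln)
--         if st != "" and not st.startswith("#"):
--             nxt = ln
--     rev.reverse()
--     return rev, fixes
-- ===== Notes on version B (the rewrite author's own statement) =====
-- stated objective: alternative
-- what changed: A scans forward and, at each 'try:', re-walks ahead over blank/comment lines to find the next significant line; B does one backward pass that carries the most recent significant line seen and builds the output back-to-front, so the lookahead scan disappears.
import Mathlib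
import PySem

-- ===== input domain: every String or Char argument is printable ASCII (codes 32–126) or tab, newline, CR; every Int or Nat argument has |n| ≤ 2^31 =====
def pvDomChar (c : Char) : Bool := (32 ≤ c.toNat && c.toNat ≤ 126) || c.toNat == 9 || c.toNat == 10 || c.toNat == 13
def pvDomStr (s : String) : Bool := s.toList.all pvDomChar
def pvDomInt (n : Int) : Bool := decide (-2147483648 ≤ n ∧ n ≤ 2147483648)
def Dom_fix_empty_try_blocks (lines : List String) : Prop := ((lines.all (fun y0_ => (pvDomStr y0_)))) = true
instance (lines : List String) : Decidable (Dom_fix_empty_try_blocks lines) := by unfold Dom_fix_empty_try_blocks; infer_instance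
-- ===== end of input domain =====

-- B replaces A's forward scan-with-lookahead by a single backward pass that remembers the
-- next significant line and builds the output back-to-front (objective: alternative, same cost).

-- indent_of(s) = s[:len(s) - len(s.lstrip(" \t"))] — exact: lstrip(" \t") removes exactly the
-- leading characters among {' ', '\t'}, i.e. dropWhile on that set (the helper appears in both Pythons).
def pvIndentOf (s : String) : String :=
  String.ofList (s.toList.take (s.toList.length - (s.toList.dropWhile (fun c => c == ' ' || c == '\t')).length))

-- base_ind + "    " + f"pass  # {RID}: inserted to fix empty try\n" with RID = "R2809" (in both Pythons)
def pvPassLine (base : String) : String :=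
  base ++ "    " ++ "pass  # R2809: inserted to fix empty try\n"

-- ===== PORT A =====
-- inner while loop: walk over blank lines and comments starting at j
def pvWalkA (lines : List String) (j : Nat) : Nat :=
  if j < lines.length then
    if PySem.Str.strip lines[j]! == "" then pvWalkA lines (j + 1)
    else if PySem.Str.startswith (PySem.Str.strip lines[j]!) "#" then pvWalkA lines (j + 1)
    else j
  else j
termination_by lines.length - j

-- outer while loop over the index i, accumulating out and fixes
def pvLoopA (lines : List String) (i : Nat) (out : List String) (fixes : Int) :
    List String × Int :=
  if i < lines.length then
    if PySem.Str.strip lines[i]! == "try:" then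
      if pvWalkA lines (i + 1) < lines.length then
        if pvIndentOf lines[pvWalkA lines (i + 1)]! == pvIndentOf lines[i]! &&
            (PySem.Str.startswith (PySem.Str.strip lines[pvWalkA lines (i + 1)]!) "except" ||
             PySem.Str.startswith (PySem.Str.strip lines[pvWalkA lines (i + 1)]!) "finally") then
          pvLoopA lines (i + 1) (out ++ [lines[i]!] ++ [pvPassLine (pvIndentOf lines[i]!)]) (fixes + 1)
        else
          pvLoopA lines (i + 1) (out ++ [lines[i]!]) fixes
      else
        pvLoopA lines (i + 1) (out ++ [lines[i]!]) fixes
    else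
      pvLoopA lines (i + 1) (out ++ [lines[i]!]) fixes
  else (out, fixes)
termination_by lines.length - i

def fix_empty_try_blocks (lines : List String) : List String × Int :=
  pvLoopA lines 0 [] 0

-- ===== PORT B =====
-- processing 'for ln in reversed(lines)' with state (rev, fixes, nxt) is structural recursion
-- taking the tail's result first; the final rev.reverse() is the cons order produced here
def pvGoB : List String → List String × Int × Option String
  | [] => ([], 0, none)
  | ln :: rest =>
    let r := pvGoB rest
    let step : List String × Int :=
      if PySem.Str.strip ln == "try:" then
        match r.2.2 with
        | some nl =>
          if pvIndentOf nl == pvIndentOf ln &&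
              (PySem.Str.startswith (PySem.Str.strip nl) "except" ||
               PySem.Str.startswith (PySem.Str.strip nl) "finally") then
            (pvPassLine (pvIndentOf ln) :: r.1, r.2.1 + 1)
          else (r.1, r.2.1)
        | none => (r.1, r.2.1)
      else (r.1, r.2.1)
    (ln :: step.1, step.2,
     if PySem.Str.strip ln != "" && !(PySem.Str.startswith (PySem.Str.strip ln) "#") then some ln
     else r.2.2)

def fix_empty_try_blocks_alt (lines : List String) : List String × Int :=
  ((pvGoB lines).1, (pvGoB lines).2.1)

-- ===== PRECONDITION & SPEC =====
def Spec_fix_empty_try_blocks (lines : List String) (out : List String × Int) : Prop := out = fix_empty_try_blocks_alt lines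
instance (lines : List String) (out : List String × Int) : Decidable (Spec_fix_empty_try_blocks lines out) := by unfold Spec_fix_empty_try_blocks; infer_instance

-- ===== CLAIM (what is proved, stated in full; the proofs are below) =====
def Claim_equal_fix_empty_try_blocks : Prop := ∀ (lines : List String), Dom_fix_empty_try_blocks lines → Spec_fix_empty_try_blocks lines (fix_empty_try_blocks lines)

-- ===== LEMMAS AND PROOFS =====

-- a line is significant iff it is neither blank nor a comment after stripping
def pvSig (s : String) : Bool :=
  PySem.Str.strip s != "" && !(PySem.Str.startswith (PySem.Str.strip s) "#")

def pvFirstSig (xs : List String) : Option String := xs.find? pvSig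

-- the fix condition, given the current line and the next significant line (if any)
def pvFixB (ln : String) (nxt : Option String) : Bool :=
  match nxt with
  | some nl =>
    (PySem.Str.strip ln == "try:") &&
      (pvIndentOf nl == pvIndentOf ln &&
        (PySem.Str.startswith (PySem.Str.strip nl) "except" ||
         PySem.Str.startswith (PySem.Str.strip nl) "finally"))
  | none => false

-- common specification, by recursion on the suffix of lines
def pvS : List String → List String × Int
  | [] => ([], 0)
  | ln :: rest =>
    let r := pvS rest
    if pvFixB ln (pvFirstSig rest) then
      (ln :: pvPassLine (pvIndentOf ln) :: r.1, r.2 + 1)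
    else (ln :: r.1, r.2)

-- walk characterisation: no significant line from j onward → the walk runs off the end
lemma pvWalkA_none (lines : List String) (j : Nat)
    (h : pvFirstSig (lines.drop j) = none) : ¬ pvWalkA lines j < lines.length := by
  induction j using pvWalkA.induct lines with
  | case1 j hj h1 ih =>
    have h1' : (PySem.Str.strip lines[j]! == "") = true := h1
    have hsig : pvSig lines[j]! = false := by
      simp only [pvSig, bne, h1', Bool.not_true, Bool.false_and]
    rw [pvWalkA]
    simp only [if_pos hj, if_pos h1']
    apply ih
    rw [List.drop_eq_getElem_cons hj, ← getElem!_pos lines j hj] at h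
    unfold pvFirstSig at h
    simp only [List.find?_cons, hsig] at h
    exact h
  | case2 j hj h1 h2 ih =>
    have h1' : ¬ (PySem.Str.strip lines[j]! == "") = true := h1
    have h2' : PySem.Str.startswith (PySem.Str.strip lines[j]!) "#" = true := h2
    have hsig : pvSig lines[j]! = false := by
      simp only [pvSig, h2', Bool.not_true, Bool.and_false]
    rw [pvWalkA]
    simp only [if_pos hj, if_neg h1', if_pos h2']
    apply ih
    rw [List.drop_eq_getElem_cons hj, ← getElem!_pos lines j hj] at h
    unfold pvFirstSig at h
    simp only [List.find?_cons, hsig] at h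
    exact h
  | case3 j hj h1 h2 =>
    have hb1 : (PySem.Str.strip lines[j]! == "") = false := by
      simpa using h1
    have hb2 : PySem.Str.startswith (PySem.Str.strip lines[j]!) "#" = false := by
      simpa using h2
    have hsig : pvSig lines[j]! = true := by
      simp only [pvSig, bne, hb1, hb2, Bool.not_false, Bool.and_self]
    rw [List.drop_eq_getElem_cons hj, ← getElem!_pos lines j hj] at h
    unfold pvFirstSig at h
    simp only [List.find?_cons, hsig] at h
    exact absurd h (by simp)
  | case4 j hj =>
    rw [pvWalkA, if_neg hj]
    exact hj

-- walk characterisation: a first significant line exists → the walk finds exactly it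
lemma pvWalkA_some (lines : List String) (j : Nat) (nl : String)
    (h : pvFirstSig (lines.drop j) = some nl) :
    pvWalkA lines j < lines.length ∧ lines[pvWalkA lines j]! = nl := by
  induction j using pvWalkA.induct lines with
  | case1 j hj h1 ih =>
    have h1' : (PySem.Str.strip lines[j]! == "") = true := h1
    have hsig : pvSig lines[j]! = false := by
      simp only [pvSig, bne, h1', Bool.not_true, Bool.false_and]
    rw [pvWalkA]
    simp only [if_pos hj, if_pos h1']
    apply ih
    rw [List.drop_eq_getElem_cons hj, ← getElem!_pos lines j hj] at h
    unfold pvFirstSig at h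
    simp only [List.find?_cons, hsig] at h
    exact h
  | case2 j hj h1 h2 ih =>
    have h1' : ¬ (PySem.Str.strip lines[j]! == "") = true := h1
    have h2' : PySem.Str.startswith (PySem.Str.strip lines[j]!) "#" = true := h2
    have hsig : pvSig lines[j]! = false := by
      simp only [pvSig, h2', Bool.not_true, Bool.and_false]
    rw [pvWalkA]
    simp only [if_pos hj, if_neg h1', if_pos h2']
    apply ih
    rw [List.drop_eq_getElem_cons hj, ← getElem!_pos lines j hj] at h
    unfold pvFirstSig at h
    simp only [List.find?_cons, hsig] at h
    exact h
  | case3 j hj h1 h2 =>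
    have hb1 : (PySem.Str.strip lines[j]! == "") = false := by
      simpa using h1
    have hb2 : PySem.Str.startswith (PySem.Str.strip lines[j]!) "#" = false := by
      simpa using h2
    have hsig : pvSig lines[j]! = true := by
      simp only [pvSig, bne, hb1, hb2, Bool.not_false, Bool.and_self]
    rw [pvWalkA]
    simp only [if_pos hj, if_neg h1, if_neg h2]
    refine ⟨hj, ?_⟩
    rw [List.drop_eq_getElem_cons hj, ← getElem!_pos lines j hj] at h
    unfold pvFirstSig at h
    simp only [List.find?_cons, hsig, Option.some.injEq] at h
    exact h
  | case4 j hj =>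
    rw [List.drop_eq_nil_of_le (by omega)] at h
    simp [pvFirstSig] at h

-- A's outer loop computes the common specification on the remaining suffix
lemma pvLoopA_eq (lines : List String) : ∀ (k i : Nat) (out : List String) (fixes : Int),
    lines.length - i = k →
    pvLoopA lines i out fixes =
      (out ++ (pvS (lines.drop i)).1, fixes + (pvS (lines.drop i)).2) := by
  intro k
  induction k with
  | zero =>
    intro i out fixes hk
    have hi : ¬ i < lines.length := by omega
    rw [pvLoopA, if_neg hi, List.drop_eq_nil_of_le (by omega)]
    simp [pvS]
  | succ k ih =>
    intro i out fixes hk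
    have hi : i < lines.length := by omega
    have hdrop : lines.drop i = lines[i]! :: lines.drop (i + 1) := by
      rw [List.drop_eq_getElem_cons hi, getElem!_pos lines i hi]
    rw [pvLoopA]
    simp only [if_pos hi]
    by_cases htry : (PySem.Str.strip lines[i]! == "try:") = true
    · simp only [if_pos htry]
      by_cases hjlt : pvWalkA lines (i + 1) < lines.length
      · simp only [if_pos hjlt]
        cases hfs : pvFirstSig (lines.drop (i + 1)) with
        | none => exact absurd hjlt (pvWalkA_none lines (i + 1) hfs)
        | some nl =>
          obtain ⟨-, hval⟩ := pvWalkA_some lines (i + 1) nl hfs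
          by_cases hcond : (pvIndentOf lines[pvWalkA lines (i + 1)]! == pvIndentOf lines[i]! &&
              (PySem.Str.startswith (PySem.Str.strip lines[pvWalkA lines (i + 1)]!) "except" ||
               PySem.Str.startswith (PySem.Str.strip lines[pvWalkA lines (i + 1)]!) "finally")) = true
          · simp only [if_pos hcond]
            have hfix : pvFixB lines[i]! (pvFirstSig (lines.drop (i + 1))) = true := by
              rw [hfs]
              simp only [pvFixB, ← hval]
              rw [htry, hcond]
              rfl
            rw [ih (i + 1) _ _ (by omega), hdrop]
            simp only [pvS]
            rw [hfix]
            simp [List.append_assoc]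
            try omega
          · simp only [if_neg hcond]
            have hfix : pvFixB lines[i]! (pvFirstSig (lines.drop (i + 1))) = false := by
              rw [hfs]
              simp only [pvFixB, ← hval]
              rw [htry]
              simpa using hcond
            rw [ih (i + 1) _ _ (by omega), hdrop]
            simp only [pvS]
            rw [hfix]
            simp [List.append_assoc]
      · simp only [if_neg hjlt]
        have hfs : pvFirstSig (lines.drop (i + 1)) = none := by
          cases hfs : pvFirstSig (lines.drop (i + 1)) with
          | none => rfl
          | some nl => exact absurd (pvWalkA_some lines (i + 1) nl hfs).1 hjlt
        have hfix : pvFixB lines[i]! (pvFirstSig (lines.drop (i + 1))) = false := by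
          rw [hfs]
          rfl
        rw [ih (i + 1) _ _ (by omega), hdrop]
        simp only [pvS]
        rw [hfix]
        simp [List.append_assoc]
    · simp only [if_neg htry]
      have hb : (PySem.Str.strip lines[i]! == "try:") = false := by
        simpa using htry
      have hfix : pvFixB lines[i]! (pvFirstSig (lines.drop (i + 1))) = false := by
        cases hfs : pvFirstSig (lines.drop (i + 1)) with
        | none => rfl
        | some nl => simp only [pvFixB, hb, Bool.false_and]
      rw [ih (i + 1) _ _ (by omega), hdrop]
      simp only [pvS]
      rw [hfix]
      simp [List.append_assoc]

-- B's backward pass computes the common specification and carries the first significant line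
lemma pvGoB_eq (xs : List String) :
    pvGoB xs = ((pvS xs).1, (pvS xs).2, pvFirstSig xs) := by
  induction xs with
  | nil => rfl
  | cons ln rest ih =>
    have hsplit : pvFirstSig (ln :: rest) =
        if pvSig ln = true then some ln else pvFirstSig rest := by
      unfold pvFirstSig
      rw [List.find?_cons]
      cases pvSig ln <;> simp
    have hbody : (PySem.Str.strip ln != "" && !(PySem.Str.startswith (PySem.Str.strip ln) "#"))
        = pvSig ln := rfl
    simp only [pvGoB, ih, hsplit, hbody, pvS]
    cases hfs : pvFirstSig rest with
    | none =>
      simp [show pvFixB ln none = false from rfl]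
    | some nl =>
      by_cases htry : (PySem.Str.strip ln == "try:") = true
      · by_cases hcond : (pvIndentOf nl == pvIndentOf ln &&
            (PySem.Str.startswith (PySem.Str.strip nl) "except" ||
             PySem.Str.startswith (PySem.Str.strip nl) "finally")) = true
        · have hfix : pvFixB ln (some nl) = true := by
            simp only [pvFixB]
            rw [htry, hcond]
            rfl
          simp only [if_pos htry, if_pos hcond, hfix, if_true]
        · have hfix : pvFixB ln (some nl) = false := by
            simp only [pvFixB]
            rw [htry]
            simpa using hcond
          simp only [if_pos htry, if_neg hcond, hfix, Bool.false_eq_true, if_false]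
      · have hb : (PySem.Str.strip ln == "try:") = false := by
          simpa using htry
        have hfix : pvFixB ln (some nl) = false := by
          simp only [pvFixB, hb, Bool.false_and]
        simp only [if_neg htry, hfix, Bool.false_eq_true, if_false]

-- ===== VERDICT (by name: the statement is the Claim_ definition above) =====
theorem fix_empty_try_blocks_spec : Claim_equal_fix_empty_try_blocks := by
  intro lines _
  show fix_empty_try_blocks lines = fix_empty_try_blocks_alt lines
  rw [fix_empty_try_blocks, fix_empty_try_blocks_alt,
    pvLoopA_eq lines (lines.length - 0) 0 [] 0 rfl, pvGoB_eq]
  simp
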